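-- pv_equiv track=rewrite | github.com/csany2020c/MyGame | Algoritmusok/tothakos.py | szamjegyszorzat
-- ===== SOURCE A (Python) =====
-- from typing import List
--
-- def bonto(x: int)-> List['int']:
--     lista: List['int'] = []
--     if x <= 0:
--         lista.append(0)
--         return lista
--     while x != 0:
--         lista.append(x % 10)
--         x = x // 10
--     lista.reverse()
--     return lista
--
-- def szamjegyszorzat(y: int) -> int:
--     szorzat = 1
--     for i in bonto(y):
--         szorzat *= i
--     if szorzat == y:
--         return True
--     else:
--         return False
-- ===== SOURCE B (Python) =====
-- def szamjegyszorzat(y: int) -> int: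
--     # Closed form: the product of the decimal digits of y equals y exactly for
--     # 0 <= y <= 9 (for y >= 10 the product is strictly smaller than y; for
--     # y <= 0 the helper's digit list is [0], so the product 0 equals y only at 0).
--     return 0 <= y <= 9
-- ===== Notes on version B (the rewrite author's own statement) =====
-- stated objective: simpler
-- what changed: B replaces the digit-decomposition loop and running product with the closed-form test 0 <= y <= 9, proved equal to A's digit-product comparison.
import Mathlib
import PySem

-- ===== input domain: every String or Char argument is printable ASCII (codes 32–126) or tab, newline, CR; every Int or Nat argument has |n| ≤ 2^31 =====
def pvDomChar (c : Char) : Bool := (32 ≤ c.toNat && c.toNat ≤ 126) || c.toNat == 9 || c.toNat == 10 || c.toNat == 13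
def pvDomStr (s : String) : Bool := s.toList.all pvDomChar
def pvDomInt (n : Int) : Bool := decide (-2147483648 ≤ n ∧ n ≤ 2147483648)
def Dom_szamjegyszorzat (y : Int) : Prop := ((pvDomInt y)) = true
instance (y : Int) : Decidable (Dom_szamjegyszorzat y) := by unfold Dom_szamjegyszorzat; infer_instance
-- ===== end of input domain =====

-- B replaces A's digit-decomposition loop and running product with a closed-form bound test (simpler; proved equal below).

-- ===== PORT A =====
-- the 'while x != 0' loop of bonto; it only runs for x > 0, where Python's % 10 and // 10 agree with Nat's
def bontoLoop : Nat → List Int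
  | 0 => []
  | (n+1) => (((n+1) % 10 : Nat) : Int) :: bontoLoop ((n+1) / 10)
decreasing_by exact Nat.div_lt_self (Nat.succ_pos n) (by omega)

def bonto (x : Int) : List Int :=
  if x ≤ 0 then [0] else (bontoLoop x.toNat).reverse

def szamjegyszorzat (y : Int) : Bool :=
  decide ((bonto y).foldl (fun szorzat i => szorzat * i) 1 = y)

-- ===== PORT B =====
def szamjegyszorzat_alt (y : Int) : Bool :=
  decide (0 ≤ y ∧ y ≤ 9)

-- ===== PRECONDITION & SPEC =====
def Spec_szamjegyszorzat (y : Int) (out : Bool) : Prop := out = szamjegyszorzat_alt y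
instance (y : Int) (out : Bool) : Decidable (Spec_szamjegyszorzat y out) := by unfold Spec_szamjegyszorzat; infer_instance

-- ===== CLAIM (what is proved, stated in full; the proofs are below) =====
def Claim_equal_szamjegyszorzat : Prop := ∀ (y : Int), Dom_szamjegyszorzat y → Spec_szamjegyszorzat y (szamjegyszorzat y)

-- ===== LEMMAS AND PROOFS =====

theorem bontoLoop_eq_digits (n : Nat) :
    bontoLoop n = (Nat.digits 10 n).map (Nat.cast : Nat → Int) := by
  induction n using Nat.strong_induction_on with
  | _ n ih =>
    match n with
    | 0 => simp [bontoLoop]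
    | (m+1) =>
      rw [bontoLoop, Nat.digits_def' (by omega : 1 < 10) (Nat.succ_pos m), List.map_cons,
        ih ((m+1)/10) (Nat.div_lt_self (Nat.succ_pos m) (by omega))]

theorem digits_prod_le (n : Nat) (h : 1 ≤ n) : (Nat.digits 10 n).prod ≤ n := by
  induction n using Nat.strong_induction_on with
  | _ n ih =>
    rw [Nat.digits_def' (by omega : 1 < 10) h, List.prod_cons]
    by_cases h10 : n < 10
    · have : n / 10 = 0 := Nat.div_eq_of_lt h10
      simp [this, Nat.mod_eq_of_lt h10]
    · have hq : 1 ≤ n / 10 := Nat.le_div_iff_mul_le (by omega) |>.mpr (by omega)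
      have := ih (n / 10) (Nat.div_lt_self (by omega) (by omega)) hq
      have hm : n % 10 ≤ 9 := by omega
      calc n % 10 * (Nat.digits 10 (n / 10)).prod ≤ 9 * (n / 10) :=
            Nat.mul_le_mul hm this
        _ ≤ n := by omega

theorem digits_prod_lt (n : Nat) (h : 10 ≤ n) : (Nat.digits 10 n).prod < n := by
  rw [Nat.digits_def' (by omega : 1 < 10) (by omega), List.prod_cons]
  have hq : 1 ≤ n / 10 := Nat.le_div_iff_mul_le (by omega) |>.mpr (by omega)
  have hp := digits_prod_le (n / 10) hq
  have hm : n % 10 ≤ 9 := by omega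
  calc n % 10 * (Nat.digits 10 (n / 10)).prod ≤ 9 * (n / 10) := Nat.mul_le_mul hm hp
    _ < n := by omega

theorem digits_single (n : Nat) (h1 : 1 ≤ n) (h9 : n ≤ 9) : Nat.digits 10 n = [n] := by
  rw [Nat.digits_def' (by omega : 1 < 10) h1, Nat.mod_eq_of_lt (by omega),
    Nat.div_eq_of_lt (by omega), Nat.digits_zero]

-- ===== VERDICT (by name: the statement is the Claim_ definition above) =====
theorem szamjegyszorzat_spec : Claim_equal_szamjegyszorzat := by
  intro y _
  unfold Spec_szamjegyszorzat szamjegyszorzat szamjegyszorzat_alt bonto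
  by_cases hy : y ≤ 0
  · simp only [hy, if_pos]
    simp only [List.foldl_cons, List.foldl_nil, one_mul]
    rw [decide_eq_decide]
    omega
  · simp only [hy, if_neg, not_false_iff]
    push Not at hy
    rw [bontoLoop_eq_digits]
    have hfold : ∀ l : List Int, l.foldl (fun szorzat i => szorzat * i) 1 = l.prod := by
      intro l; rw [List.prod_eq_foldl]
    rw [hfold, List.prod_reverse, ← Nat.cast_list_prod]
    set n := y.toNat with hn
    have hyn : y = (n : Int) := by omega
    have h1 : 1 ≤ n := by omega
    rw [hyn, decide_eq_decide, Nat.cast_inj]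
    constructor
    · intro hp
      by_contra hc
      have h10 : 10 ≤ n := by omega
      exact absurd hp (Nat.ne_of_lt (digits_prod_lt n h10))
    · rintro ⟨-, h9⟩
      have h9' : n ≤ 9 := by exact_mod_cast (by omega : (n : Int) ≤ 9)
      rw [digits_single n h1 h9', List.prod_singleton]
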